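-- pv_equiv track=rewrite | github.com/fractalkitty/fractalkitty.github.io | updateHtml.py | format_tally_string
-- ===== SOURCE A (Python) =====
-- def format_tally_string(letters):
--     # Remove empty strings and format into groups of 5
--     letters = [l for l in letters if l]
--     groups = []
--     for i in range(0, len(letters), 5):
--         group = letters[i:i+5]
--         if group:  # Only add non-empty groups
--             groups.append(''.join(group))
--     return ' . '.join(groups)
-- ===== SOURCE B (Python) =====
-- def format_tally_string(letters):
--     # One pass: filter, chunk into fives, and collect group strings together.
--     groups = []
--     cur = []
--     for l in letters:
--         if l:
--             cur.append(l)
--             if len(cur) == 5: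
--                 groups.append(''.join(cur))
--                 cur = []
--     if cur:
--         groups.append(''.join(cur))
--     return ' . '.join(groups)
-- ===== Notes on version B (the rewrite author's own statement) =====
-- stated objective: alternative
-- what changed: Replaced A's two passes (a filtering comprehension, then an index/slice loop over range(0,len,5)) by a single traversal that skips falsy elements and maintains a current group, flushing it every 5 kept elements and once at the end.
import Mathlib
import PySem

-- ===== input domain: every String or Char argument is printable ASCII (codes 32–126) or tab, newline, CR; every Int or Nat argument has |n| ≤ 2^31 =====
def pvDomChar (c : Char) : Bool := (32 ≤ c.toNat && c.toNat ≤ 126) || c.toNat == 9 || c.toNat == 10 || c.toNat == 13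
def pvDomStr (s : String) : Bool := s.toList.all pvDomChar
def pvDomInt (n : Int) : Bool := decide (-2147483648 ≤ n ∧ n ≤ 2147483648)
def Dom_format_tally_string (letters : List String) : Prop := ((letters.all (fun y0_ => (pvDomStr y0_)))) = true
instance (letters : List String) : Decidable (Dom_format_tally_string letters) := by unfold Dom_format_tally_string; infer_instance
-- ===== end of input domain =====

-- B fuses A's two passes (filter comprehension, then range/slice chunking loop) into one
-- traversal with a running current group; alternative decomposition, same asymptotic cost.


-- ===== PORT A =====
def format_tally_string (letters : List String) : String :=
  -- letters = [l for l in letters if l]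
  let letters := letters.filter (fun l => l ≠ "")
  -- for i in range(0, len(letters), 5): group = letters[i:i+5]; if group: groups.append(''.join(group))
  let groups := (PySem.List.pyRange 0 (letters.length : Int) 5).foldl
    (fun (groups : List String) (i : Int) =>
      let group := PySem.List.slice letters (some i) (some (i + 5))
      if group ≠ [] then groups ++ [PySem.Str.join "" group] else groups) []
  PySem.Str.join " . " groups

-- ===== PORT B =====
-- one step of B's single loop: skip falsy, append to the current group, flush at 5
def stepB (st : List String × List String) (l : String) : List String × List String :=
  if l ≠ "" then
    let cur := st.2 ++ [l]
    if cur.length = 5 then (st.1 ++ [PySem.Str.join "" cur], []) else (st.1, cur)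
  else st

def format_tally_string_alt (letters : List String) : String :=
  let st := letters.foldl stepB ([], [])
  let groups := if st.2 ≠ [] then st.1 ++ [PySem.Str.join "" st.2] else st.1
  PySem.Str.join " . " groups

-- ===== PRECONDITION & SPEC =====
def Spec_format_tally_string (letters : List String) (out : String) : Prop := out = format_tally_string_alt letters
instance (letters : List String) (out : String) : Decidable (Spec_format_tally_string letters out) := by unfold Spec_format_tally_string; infer_instance

-- ===== CLAIM (what is proved, stated in full; the proofs are below) =====
def Claim_equal_format_tally_string : Prop := ∀ (letters : List String), Dom_format_tally_string letters → Spec_format_tally_string letters (format_tally_string letters)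

-- ===== LEMMAS AND PROOFS =====

/-- The common reference: successive groups of five, each joined with `""`. -/
def chunk5 (xs : List String) : List String :=
  if xs = [] then []
  else PySem.Str.join "" (xs.take 5) :: chunk5 (xs.drop 5)
termination_by xs.length
decreasing_by
  rename_i h
  have : 0 < xs.length := List.length_pos_iff.mpr h
  simp [List.length_drop]; omega

theorem chunk5_nil : chunk5 [] = [] := by simp [chunk5]

theorem chunk5_short (xs : List String) (h0 : xs ≠ []) (h5 : xs.length < 5) :
    chunk5 xs = [PySem.Str.join "" xs] := by
  rw [chunk5, if_neg h0, List.take_of_length_le (show xs.length ≤ 5 by omega),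
    List.drop_eq_nil_of_le (show xs.length ≤ 5 by omega), chunk5_nil]

theorem chunk5_full (xs rest : List String) (h : xs.length = 5) :
    chunk5 (xs ++ rest) = PySem.Str.join "" xs :: chunk5 rest := by
  have hne : xs ++ rest ≠ [] := by
    intro hc
    have := congrArg List.length hc
    simp [h] at this
  rw [chunk5, if_neg hne, show (5 : Nat) = xs.length from h.symm,
    List.take_left, List.drop_left]

/-- A's chunking as a closed map over group indices. -/
theorem chunk5_eq_map (xs : List String) :
    chunk5 xs = (List.range ((xs.length + 4) / 5)).map
      (fun k => PySem.Str.join "" ((xs.drop (5 * k)).take 5)) := by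
  by_cases h : xs = []
  · simp [h, chunk5_nil]
  · have hlen : 0 < xs.length := List.length_pos_iff.mpr h
    rw [chunk5]
    have ih := chunk5_eq_map (xs.drop 5)
    have hm : (xs.length + 4) / 5 = ((xs.drop 5).length + 4) / 5 + 1 := by
      simp [List.length_drop]; omega
    rw [hm, List.range_succ_eq_map]
    simp only [List.map_cons, List.map_map]
    simp [h, ih]
    intro a ha
    have harith : 5 + 5 * a = 5 * (a + 1) := by ring
    rw [harith]
termination_by xs.length
decreasing_by
  have : 0 < xs.length := List.length_pos_iff.mpr h
  simp [List.length_drop]; omega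

/-- A's grouping loop computes `chunk5` of the (already filtered) list. -/
theorem loopA_eq_chunk5 (xs : List String) :
    (PySem.List.pyRange 0 (xs.length : Int) 5).foldl
      (fun (groups : List String) (i : Int) =>
        let group := PySem.List.slice xs (some i) (some (i + 5))
        if group ≠ [] then groups ++ [PySem.Str.join "" group] else groups) []
    = chunk5 xs := by
  rw [PySem.List.pyRange_of_pos 0 (xs.length : Int) (by norm_num)]
  have hcnt : (if (0 : Int) < (xs.length : Int) then
      ((((xs.length : Int) - 0 + 5 - 1) / 5).toNat) else 0) = (xs.length + 4) / 5 := by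
    split_ifs with h
    · have h0 : 0 < xs.length := by exact_mod_cast h
      omega
    · have h0 : xs.length = 0 := by omega
      omega
  rw [hcnt, List.foldl_map]
  have hstep : ∀ (acc : List String) (k : Nat), k ∈ List.range ((xs.length + 4) / 5) →
      (fun (groups : List String) (i : Int) =>
        let group := PySem.List.slice xs (some i) (some (i + 5))
        if group ≠ [] then groups ++ [PySem.Str.join "" group] else groups) acc (0 + 5 * (k : Int))
      = acc ++ [PySem.Str.join "" ((xs.drop (5 * k)).take 5)] := by
    intro acc k hk
    have hk' : 5 * k < xs.length := by
      have := List.mem_range.mp hk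
      omega
    have hcast : (0 : Int) + 5 * (k : Int) = ((5 * k : Nat) : Int) := by push_cast; ring
    have hcast2 : ((5 * k : Nat) : Int) + 5 = ((5 * k : Nat) : Int) + ((5 : Nat) : Int) := by norm_num
    simp only [hcast, hcast2, PySem.List.slice_natCast_add]
    have hne : (xs.drop (5 * k)).take 5 ≠ [] := by
      have : 0 < (xs.drop (5 * k)).length := by simp [List.length_drop]; omega
      intro hc
      have := congrArg List.length hc
      simp at this
      omega
    simp [hne]
  rw [PySem.List.foldl_congr_mem _ _ _ _ hstep, PySem.List.foldl_append_singleton_eq_map]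
  rw [chunk5_eq_map]
  simp

/-- Flush of B's final state. -/
def flushB (st : List String × List String) : List String :=
  if st.2 ≠ [] then st.1 ++ [PySem.Str.join "" st.2] else st.1

theorem stepB_skip (st : List String × List String) (l : String) (hl : l = "") :
    stepB st l = st := by simp [stepB, hl]

theorem stepB_flush (st : List String × List String) (l : String) (hl : l ≠ "")
    (h5 : (st.2 ++ [l]).length = 5) :
    stepB st l = (st.1 ++ [PySem.Str.join "" (st.2 ++ [l])], []) := by
  simp [stepB, hl, h5]

theorem stepB_keep (st : List String × List String) (l : String) (hl : l ≠ "")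
    (h5 : (st.2 ++ [l]).length ≠ 5) :
    stepB st l = (st.1, st.2 ++ [l]) := by
  simp only [stepB]
  rw [if_pos hl]
  simp only [h5, if_false]

/-- B's loop invariant: flushing the fold's result yields the groups already emitted
    followed by the chunks of the pending group plus the kept remainder. -/
theorem loopB_invariant (ys : List String) (gs cur : List String) (hcur : cur.length < 5) :
    flushB (ys.foldl stepB (gs, cur))
    = gs ++ chunk5 (cur ++ ys.filter (fun l => l ≠ "")) := by
  induction ys generalizing gs cur with
  | nil =>
    simp only [List.foldl_nil, List.filter_nil, List.append_nil, flushB]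
    by_cases h : cur = []
    · simp [h, chunk5_nil]
    · simp [h, chunk5_short cur h hcur]
  | cons l ys ih =>
    rw [List.foldl_cons, List.filter_cons]
    by_cases hl : l = ""
    · rw [stepB_skip _ _ hl, if_neg (by simp [hl])]
      exact ih gs cur hcur
    · rw [if_pos (by simp [hl])]
      by_cases h5 : (cur ++ [l]).length = 5
      · rw [stepB_flush _ _ hl h5, ih _ [] (by norm_num),
          show cur ++ l :: ys.filter (fun l => l ≠ "")
            = (cur ++ [l]) ++ ys.filter (fun l => l ≠ "") by simp,
          chunk5_full _ _ h5]
        simp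
      · have hlen : (cur ++ [l]).length < 5 := by
          simp only [List.length_append, List.length_cons, List.length_nil] at h5 ⊢
          omega
        rw [stepB_keep _ _ hl h5, ih _ _ hlen]
        simp

-- ===== VERDICT (by name: the statement is the Claim_ definition above) =====
theorem format_tally_string_spec : Claim_equal_format_tally_string := by
  intro letters _
  show format_tally_string letters = format_tally_string_alt letters
  have hB : format_tally_string_alt letters
      = PySem.Str.join " . " (flushB (letters.foldl stepB ([], []))) := rfl
  have hA : format_tally_string letters
      = PySem.Str.join " . " (chunk5 (letters.filter (fun l => l ≠ ""))) := by
    unfold format_tally_string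
    dsimp only
    rw [loopA_eq_chunk5]
  rw [hA, hB, loopB_invariant letters [] [] (by norm_num)]
  simp
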